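-- pv_equiv track=rewrite | github.com/kevin2018pg/Leetcode-Solutions | Leetcode-Solutions/Solutions-Python/offer/frogjumpsonthesteps.py | numWays_s3
-- ===== SOURCE A (Python) =====
-- def numWays_s3(n: int) -> int:
--     if n <= 1:
--         return 1
--     if n == 2:
--         return 2
--     a, b = 1, 2
--     for i in range(3, n + 1):
--         a, b = b, a + b
--     return b % 1000000007
-- ===== SOURCE B (Python) =====
-- def numWays_s3(n: int) -> int:
--     # Fast-doubling Fibonacci modulo the problem constant: O(log n) instead of A's O(n) big-int loop.
--     M = 1000000007
--     if n <= 1: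
--         return 1
--
--     def fd(k):  # (F(k) % M, F(k+1) % M), F(0)=0, F(1)=1
--         if k == 0:
--             return (0, 1)
--         a, b = fd(k // 2)
--         c = a * (2 * b - a) % M
--         d = (a * a + b * b) % M
--         if k % 2 == 0:
--             return (c, d)
--         return (d, (c + d) % M)
--
--     return fd(n + 1)[0]
-- ===== Notes on version B (the rewrite author's own statement) =====
-- stated objective: faster
-- what changed: Replaced the O(n) iterative big-integer Fibonacci loop (modulus applied only once at the end) with O(log n) fast-doubling recursion that reduces by the modulus at every step.
import Mathlib
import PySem

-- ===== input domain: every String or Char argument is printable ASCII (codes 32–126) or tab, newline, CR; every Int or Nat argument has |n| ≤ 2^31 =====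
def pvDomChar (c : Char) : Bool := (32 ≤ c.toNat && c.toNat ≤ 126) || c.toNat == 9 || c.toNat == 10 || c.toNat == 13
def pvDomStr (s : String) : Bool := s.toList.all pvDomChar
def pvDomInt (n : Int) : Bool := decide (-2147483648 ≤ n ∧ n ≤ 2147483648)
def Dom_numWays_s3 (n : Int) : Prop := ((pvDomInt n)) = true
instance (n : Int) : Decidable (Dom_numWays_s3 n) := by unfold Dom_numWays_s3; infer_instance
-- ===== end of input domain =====

-- B replaces A's O(n) iterative Fibonacci loop by O(log n) fast-doubling modular recursion (measured faster).


-- ===== PORT A =====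
def numWays_s3 (n : Int) : Int :=
  if n ≤ 1 then 1
  else if n = 2 then 2
  else
    let st := (PySem.List.pyRange 3 (n + 1) 1).foldl
      (fun (ab : Int × Int) _ => (ab.2, ab.1 + ab.2)) ((1 : Int), (2 : Int))
    PySem.Int.mod st.2 1000000007

-- ===== PORT B =====
-- fd from Source B: fuel-indexed structural recursion (fuel = k suffices since k//2 < k);
-- argument k = n+1 is a nonnegative int, carried as Nat (Python's k//2 on it is Nat division).
def pvFd : Nat → Nat → Int × Int
  | 0, _ => (0, 1)
  | fuel + 1, k =>
    if k = 0 then (0, 1)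
    else
      let p := pvFd fuel (k / 2)
      let a := p.1
      let b := p.2
      let c := PySem.Int.mod (a * (2 * b - a)) 1000000007
      let d := PySem.Int.mod (a * a + b * b) 1000000007
      if k % 2 = 0 then (c, d) else (d, PySem.Int.mod (c + d) 1000000007)

def numWays_s3_alt (n : Int) : Int :=
  if n ≤ 1 then 1
  else (pvFd (n + 1).toNat (n + 1).toNat).1

-- ===== PRECONDITION & SPEC =====
def Spec_numWays_s3 (n : Int) (out : Int) : Prop := out = numWays_s3_alt n
instance (n : Int) (out : Int) : Decidable (Spec_numWays_s3 n out) := by unfold Spec_numWays_s3; infer_instance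

-- ===== CLAIM (what is proved, stated in full; the proofs are below) =====
def Claim_equal_numWays_s3 : Prop := ∀ (n : Int), Dom_numWays_s3 n → Spec_numWays_s3 n (numWays_s3 n)

-- ===== LEMMAS AND PROOFS =====

-- fast doubling computes (fib k, fib (k+1)) reduced by the modulus
theorem pvFd_eq (fuel k : Nat) (hk : k ≤ fuel) :
    pvFd fuel k = ((Nat.fib k : Int) % 1000000007, (Nat.fib (k + 1) : Int) % 1000000007) := by
  induction fuel generalizing k with
  | zero =>
    interval_cases k
    simp [pvFd]
  | succ fuel ih =>
    rcases Nat.eq_zero_or_pos k with hk0 | hk0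
    · subst hk0; simp [pvFd]
    · have hk0' : k ≠ 0 := by omega
      have hM : (0 : Int) < 1000000007 := by norm_num
      rcases Nat.mod_two_eq_zero_or_one k with hkm0 | hkm1
      · obtain ⟨m, rfl⟩ : ∃ m, k = 2 * m := ⟨k / 2, by omega⟩
        have hdiv : 2 * m / 2 = m := by omega
        have hrec := ih m (by omega)
        have hfe : (Nat.fib (2 * m) : Int) = (Nat.fib m : Int) * (2 * Nat.fib (m + 1) - Nat.fib m) := by
          have h := Nat.fib_two_mul m
          have hle : Nat.fib m ≤ 2 * Nat.fib (m + 1) := le_trans Nat.fib_le_fib_succ (by omega)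
          push_cast [h, hle]; ring
        have hfo : (Nat.fib (2 * m + 1) : Int) =
            (Nat.fib m : Int) * Nat.fib m + (Nat.fib (m + 1) : Int) * Nat.fib (m + 1) := by
          have h := Nat.fib_two_mul_add_one m
          push_cast [h]; ring
        simp only [pvFd, if_neg hk0', hdiv, hrec, Nat.mul_mod_right, if_true,
          PySem.Int.mod_eq_emod_of_pos hM, Prod.mk.injEq]
        refine ⟨?_, ?_⟩
        · rw [hfe]
          simp [Int.mul_emod, Int.sub_emod]
        · rw [hfo]
          simp [Int.add_emod, Int.mul_emod]
      · obtain ⟨m, rfl⟩ : ∃ m, k = 2 * m + 1 := ⟨k / 2, by omega⟩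
        have hdiv : (2 * m + 1) / 2 = m := by omega
        have hrec := ih m (by omega)
        have hfe : (Nat.fib (2 * m) : Int) = (Nat.fib m : Int) * (2 * Nat.fib (m + 1) - Nat.fib m) := by
          have h := Nat.fib_two_mul m
          have hle : Nat.fib m ≤ 2 * Nat.fib (m + 1) := le_trans Nat.fib_le_fib_succ (by omega)
          push_cast [h, hle]; ring
        have hfo : (Nat.fib (2 * m + 1) : Int) =
            (Nat.fib m : Int) * Nat.fib m + (Nat.fib (m + 1) : Int) * Nat.fib (m + 1) := by
          have h := Nat.fib_two_mul_add_one m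
          push_cast [h]; ring
        have hmod : ¬ (2 * m + 1) % 2 = 0 := by omega
        simp only [pvFd, if_neg hk0', hdiv, hrec, if_neg hmod,
          PySem.Int.mod_eq_emod_of_pos hM, Prod.mk.injEq]
        refine ⟨?_, ?_⟩
        · rw [hfo]
          simp [Int.add_emod, Int.mul_emod]
        · have hfib : (Nat.fib (2 * m + 1 + 1) : Int) = Nat.fib (2 * m) + Nat.fib (2 * m + 1) := by
            have h := Nat.fib_add_two (n := 2 * m)
            push_cast [h]; ring
          rw [hfib, hfe, hfo]
          simp [Int.add_emod, Int.mul_emod, Int.sub_emod]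

-- A's loop: after range(3, m+3), the pair is (fib (m+2), fib (m+3))
theorem pvLoopA (m : Nat) :
    (PySem.List.pyRange 3 (3 + (m : Int)) 1).foldl
      (fun (ab : Int × Int) _ => (ab.2, ab.1 + ab.2)) ((1 : Int), (2 : Int))
    = ((Nat.fib (m + 2) : Int), (Nat.fib (m + 3) : Int)) := by
  induction m with
  | zero =>
    rw [PySem.List.pyRange_one_eq_nil (by omega : (3 : Int) + (0 : Nat) ≤ 3)]
    simp only [List.foldl_nil]
    decide
  | succ m ih =>
    have h : (3 + ((m : Nat) + 1 : Nat) : Int) = (3 + (m : Int)) + 1 := by push_cast; ring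
    rw [h, PySem.List.pyRange_one_succ_right (by omega : (3 : Int) ≤ 3 + (m : Int)),
      List.foldl_append, ih]
    simp only [List.foldl_cons, List.foldl_nil, Prod.mk.injEq]
    have h2 : Nat.fib (m + 1 + 3) = Nat.fib (m + 2) + Nat.fib (m + 3) := Nat.fib_add_two
    refine ⟨trivial, ?_⟩
    exact_mod_cast h2.symm

-- ===== VERDICT (by name: the statement is the Claim_ definition above) =====
theorem numWays_s3_spec : Claim_equal_numWays_s3 := by
  intro n _
  unfold Spec_numWays_s3 numWays_s3 numWays_s3_alt
  by_cases h1 : n ≤ 1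
  · simp [h1]
  · simp only [if_neg h1]
    have hM : (0 : Int) < 1000000007 := by norm_num
    by_cases h2 : n = 2
    · subst h2
      have h3 : ((2 : Int) + 1).toNat = 3 := by decide
      rw [if_pos rfl, h3, pvFd_eq 3 3 le_rfl]
      decide
    · simp only [if_neg h2]
      have hn3 : 3 ≤ n := by omega
      set m : Nat := (n - 3).toNat with hm
      have hcast : n = 3 + (m : Int) := by omega
      have ht : (n + 1).toNat = m + 4 := by omega
      rw [ht, pvFd_eq _ _ le_rfl,
        show n + 1 = 3 + ((m + 1 : Nat) : Int) by push_cast; omega,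
        pvLoopA (m + 1), PySem.Int.mod_eq_emod_of_pos hM]
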